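-- pv_equiv track=rewrite | github.com/QuantLaw/legal-data-preprocessing | statutes_pipeline_steps/de_reference_parse.py | split_parts_accidently_joined
-- ===== SOURCE A (Python) =====
-- import itertools
-- from collections import Counter
--
-- def split_parts_accidently_joined(reference_paths):
--     new_reference_paths = []
--     main_unit = (
--         "Art"
--         if Counter([part[0] for part in itertools.chain(*reference_paths)]).get("Art")
--         else "§"
--     )
--     for reference_path in reference_paths:
--         temp_path = []
--         for part in reference_path:
--             if part[0] == main_unit:
--                 if len(temp_path):
--                     new_reference_paths.append(temp_path)
--                 temp_path = []
--             temp_path.append(part)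
--         new_reference_paths.append(temp_path)
--     return new_reference_paths
-- ===== SOURCE B (Python) =====
-- def split_parts_accidently_joined(reference_paths):
--     main_unit = (
--         "Art"
--         if any(part[0] == "Art" for path in reference_paths for part in path)
--         else "§"
--     )
--     new_reference_paths = []
--     for reference_path in reference_paths:
--         boundaries = [
--             i
--             for i, part in enumerate(reference_path)
--             if i > 0 and part[0] == main_unit
--         ]
--         cuts = [0] + boundaries + [len(reference_path)]
--         new_reference_paths.extend(
--             reference_path[a:b] for a, b in zip(cuts, cuts[1:])
--         )
--     return new_reference_paths
-- ===== Notes on version B (the rewrite author's own statement) =====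
-- stated objective: alternative
-- what changed: B replaces A's Counter-based main-unit test and accumulate-and-flush inner loop by an any() test plus index-and-slice segmentation: per path it collects the boundary indices (>0) and emits the slices between consecutive cut points.
import Mathlib
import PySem

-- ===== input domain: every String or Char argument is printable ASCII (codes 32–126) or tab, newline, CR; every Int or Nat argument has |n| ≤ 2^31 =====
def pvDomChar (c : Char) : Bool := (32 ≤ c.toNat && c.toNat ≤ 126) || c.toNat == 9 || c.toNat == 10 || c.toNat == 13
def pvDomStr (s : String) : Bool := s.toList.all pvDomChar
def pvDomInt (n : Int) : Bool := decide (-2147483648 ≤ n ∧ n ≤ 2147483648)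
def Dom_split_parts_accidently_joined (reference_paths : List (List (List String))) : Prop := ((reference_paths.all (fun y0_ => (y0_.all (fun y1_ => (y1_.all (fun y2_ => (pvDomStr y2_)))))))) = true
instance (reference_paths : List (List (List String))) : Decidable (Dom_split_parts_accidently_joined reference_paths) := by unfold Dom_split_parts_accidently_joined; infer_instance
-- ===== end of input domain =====

-- B: same segmentation via an any() main-unit test and index-and-slice cutting instead of
-- A's Counter lookup and accumulate-and-flush loop (objective: alternative decomposition).

-- part[0]; exact on Pre_ (every part nonempty)
def pvHead (part : List String) : String := part.headD ""

-- ===== PORT A =====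
def split_parts_accidently_joined (reference_paths : List (List (List String))) : List (List (List String)) :=
  let main_unit : String :=
    match (PySem.Dict.counter ((reference_paths.flatten).map pvHead)).get? "Art" with
    | some n => if n ≠ 0 then "Art" else "§"
    | none => "§"
  reference_paths.foldl (fun new_reference_paths reference_path =>
    let st := reference_path.foldl
      (fun (s : List (List (List String)) × List (List String)) part =>
        if pvHead part == main_unit then
          ((if s.2.length ≠ 0 then s.1 ++ [s.2] else s.1), [part])
        else
          (s.1, s.2 ++ [part]))
      (new_reference_paths, [])
    st.1 ++ [st.2]) []

-- ===== PORT B =====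
def split_parts_accidently_joined_alt (reference_paths : List (List (List String))) : List (List (List String)) :=
  let main_unit : String :=
    if reference_paths.flatten.any (fun part => pvHead part == "Art") then "Art" else "§"
  reference_paths.foldl (fun out reference_path =>
    let boundaries : List Int := (PySem.List.enumerate reference_path 0).filterMap
      (fun ip => if ip.1 > 0 ∧ pvHead ip.2 == main_unit then some ip.1 else none)
    let cuts : List Int := 0 :: boundaries ++ [(reference_path.length : Int)]
    out ++ (cuts.zip cuts.tail).map
      (fun ab => PySem.List.slice reference_path (some ab.1) (some ab.2))) []

-- ===== PRECONDITION & SPEC =====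
-- Pre_ excludes inputs containing an empty part, on which A raises IndexError (part[0]).
def Pre_split_parts_accidently_joined (reference_paths : List (List (List String))) : Prop :=
  ∀ path ∈ reference_paths, ∀ part ∈ path, part ≠ []
instance (reference_paths : List (List (List String))) : Decidable (Pre_split_parts_accidently_joined reference_paths) := by unfold Pre_split_parts_accidently_joined; infer_instance

def pvWitness_split_parts_accidently_joined : List (List (List String)) :=
  [[["Art", "1"], ["Abs", "2"], ["Art", "3"]], [["Nr", "4"]]]

def Spec_split_parts_accidently_joined (reference_paths : List (List (List String))) (out : List (List (List String))) : Prop := out = split_parts_accidently_joined_alt reference_paths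
instance (reference_paths : List (List (List String))) (out : List (List (List String))) : Decidable (Spec_split_parts_accidently_joined reference_paths out) := by unfold Spec_split_parts_accidently_joined; infer_instance

-- ===== CLAIM (what is proved, stated in full; the proofs are below) =====
def Claim_equal_split_parts_accidently_joined : Prop := ∀ (reference_paths : List (List (List String))), Dom_split_parts_accidently_joined reference_paths → Pre_split_parts_accidently_joined reference_paths → Spec_split_parts_accidently_joined reference_paths (split_parts_accidently_joined reference_paths)

-- ===== LEMMAS AND PROOFS =====

-- segmentation of one path, as A computes it (flush before each later boundary)
def pvChop (mu : String) (cur : List (List String)) : List (List String) → List (List (List String))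
  | [] => [cur]
  | p :: ps => if pvHead p == mu then cur :: pvChop mu [p] ps else pvChop mu (cur ++ [p]) ps

def pvSegA (mu : String) : List (List String) → List (List (List String))
  | [] => [[]]
  | p :: ps => pvChop mu [p] ps

-- all boundary positions (0-based, including 0) of a part list
def pvAllB (mu : String) : List (List String) → List Nat
  | [] => []
  | p :: ps => if pvHead p == mu then 0 :: (pvAllB mu ps).map (· + 1) else (pvAllB mu ps).map (· + 1)

-- nat-level model of B's slice extraction
def pvSlices (base : List (List String)) (cuts : List Nat) : List (List (List String)) :=
  (cuts.zip cuts.tail).map (fun ab => (base.drop ab.1).take (ab.2 - ab.1))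

lemma pvSlices_cons₂ (base : List (List String)) (a b : Nat) (t : List Nat) :
    pvSlices base (a :: b :: t) = ((base.drop a).take (b - a)) :: pvSlices base (b :: t) := by
  simp [pvSlices]

lemma pvSlices_shift (w z : List (List String)) (cuts : List Nat) :
    pvSlices (w ++ z) (cuts.map (· + w.length)) = pvSlices z cuts := by
  unfold pvSlices
  rw [← List.map_tail, List.zip_map, List.map_map]
  apply List.map_congr_left
  intro ab _
  obtain ⟨a, b⟩ := ab
  show ((w ++ z).drop (a + w.length)).take ((b + w.length) - (a + w.length)) = (z.drop a).take (b - a)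
  rw [Nat.add_comm a, List.drop_length_add_append]
  congr 1
  omega

lemma pvChop_eq_slices (mu : String) (ps : List (List String)) :
    ∀ cur : List (List String), cur ≠ [] →
    pvChop mu cur ps
      = pvSlices (cur ++ ps) (0 :: (pvAllB mu ps).map (· + cur.length) ++ [cur.length + ps.length]) := by
  induction ps with
  | nil =>
    intro cur hcur
    simp [pvChop, pvAllB, pvSlices]
  | cons q qs ih =>
    intro cur hcur
    by_cases hb : pvHead q == mu
    · rw [pvChop, if_pos hb, pvAllB, if_pos hb]
      have key : pvSlices (cur ++ (q :: qs))
            (0 :: (0 :: (pvAllB mu qs).map (· + 1)).map (· + cur.length) ++ [cur.length + (q :: qs).length])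
          = cur :: pvSlices (q :: qs) (0 :: (pvAllB mu qs).map (· + 1) ++ [1 + qs.length]) := by
        have h1 : (0 :: (pvAllB mu qs).map (· + 1)).map (· + cur.length) ++ [cur.length + (q :: qs).length]
            = cur.length :: ((pvAllB mu qs).map (· + 1) ++ [1 + qs.length]).map (· + cur.length) := by
          simp [List.map_map]
          omega
        rw [show (0 : Nat) :: (0 :: (pvAllB mu qs).map (· + 1)).map (· + cur.length) ++ [cur.length + (q :: qs).length]
              = 0 :: cur.length :: ((pvAllB mu qs).map (· + 1) ++ [1 + qs.length]).map (· + cur.length) from by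
            rw [List.cons_append, h1]]
        rw [pvSlices_cons₂]
        congr 1
        · simp
        · have h3 : (cur.length :: ((pvAllB mu qs).map (· + 1) ++ [1 + qs.length]).map (· + cur.length))
              = (0 :: ((pvAllB mu qs).map (· + 1) ++ [1 + qs.length])).map (· + cur.length) := by simp
          rw [h3, pvSlices_shift, List.cons_append]
      rw [key]
      have := ih [q] (by simp)
      simp only [List.singleton_append, List.length_cons, List.length_nil] at this
      rw [this]
    · rw [pvChop, if_neg hb, pvAllB, if_neg hb]
      rw [ih (cur ++ [q]) (by simp)]
      have hbase : (cur ++ [q]) ++ qs = cur ++ (q :: qs) := by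
        rw [List.append_assoc]; rfl
      have hc : (pvAllB mu qs).map (· + (cur ++ [q]).length)
          = ((pvAllB mu qs).map (· + 1)).map (· + cur.length) := by
        simp [List.map_map]
        intros
        omega
      have hy : (cur ++ [q]).length + qs.length = cur.length + (q :: qs).length := by
        simp; omega
      rw [hbase, hc, hy]

lemma pvEnum_filterMap (mu : String) (ps : List (List String)) :
    ∀ s : Nat, 1 ≤ s →
    (PySem.List.enumerate ps (s : Int)).filterMap
        (fun ip => if ip.1 > 0 ∧ pvHead ip.2 == mu then some ip.1 else none)
      = (pvAllB mu ps).map (fun i => ((i + s : Nat) : Int)) := by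
  induction ps with
  | nil => intro s hs; simp [PySem.List.enumerate_nil, pvAllB]
  | cons q qs ih =>
    intro s hs
    rw [PySem.List.enumerate_cons, List.filterMap_cons]
    have hs1 : ((s : Int) + 1) = ((s + 1 : Nat) : Int) := by push_cast; ring
    rw [hs1, ih (s + 1) (by omega)]
    by_cases hb : pvHead q == mu
    · have hpos : ((s : Int), q).1 > 0 := by show (0 : Int) < (s : Int); exact_mod_cast hs
      rw [if_pos ⟨hpos, hb⟩, pvAllB, if_pos hb]
      simp [List.map_map]
      intros; omega
    · rw [if_neg (by simp [hb]), pvAllB, if_neg hb]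
      simp [List.map_map]
      intros; omega

lemma pvSlices_cast (base : List (List String)) (cutsN : List Nat) :
    ((cutsN.map (Nat.cast : Nat → Int)).zip (cutsN.map (Nat.cast : Nat → Int)).tail).map
        (fun ab => PySem.List.slice base (some ab.1) (some ab.2))
      = pvSlices base cutsN := by
  unfold pvSlices
  rw [← List.map_tail]
  have h : ∀ (l1 l2 : List Nat),
      ((l1.map (Nat.cast : Nat → Int)).zip (l2.map (Nat.cast : Nat → Int))).map
          (fun ab => PySem.List.slice base (some ab.1) (some ab.2))
        = (l1.zip l2).map (fun ab => (base.drop ab.1).take (ab.2 - ab.1)) := by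
    intro l1
    induction l1 with
    | nil => intro l2; simp
    | cons a t ih =>
      intro l2
      cases l2 with
      | nil => simp
      | cons b t2 =>
        simp [ih, PySem.List.slice_natCast]
  exact h cutsN cutsN.tail

lemma pvSegB_path (mu : String) (path : List (List String)) :
    ((0 :: (PySem.List.enumerate path 0).filterMap
        (fun ip => if ip.1 > 0 ∧ pvHead ip.2 == mu then some ip.1 else none) ++ [(path.length : Int)]).zip
      (0 :: (PySem.List.enumerate path 0).filterMap
        (fun ip => if ip.1 > 0 ∧ pvHead ip.2 == mu then some ip.1 else none) ++ [(path.length : Int)]).tail).map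
        (fun ab => PySem.List.slice path (some ab.1) (some ab.2))
      = pvSegA mu path := by
  cases path with
  | nil => rfl
  | cons p ps =>
    have hb : (PySem.List.enumerate (p :: ps) 0).filterMap
        (fun ip => if ip.1 > 0 ∧ pvHead ip.2 == mu then some ip.1 else none)
        = ((pvAllB mu ps).map (· + 1)).map (Nat.cast : Nat → Int) := by
      rw [PySem.List.enumerate_cons, List.filterMap_cons]
      rw [if_neg (by simp)]
      have h01 : (0 : Int) + 1 = ((1 : Nat) : Int) := by norm_num
      rw [h01, pvEnum_filterMap mu ps 1 le_rfl, List.map_map]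
      rfl
    rw [hb]
    have hcuts : (0 : Int) :: ((pvAllB mu ps).map (· + 1)).map (Nat.cast : Nat → Int) ++ [((p :: ps).length : Int)]
        = (0 :: (pvAllB mu ps).map (· + 1) ++ [1 + ps.length]).map (Nat.cast : Nat → Int) := by
      simp
      omega
    rw [hcuts, pvSlices_cast]
    show pvSlices (p :: ps) _ = pvChop mu [p] ps
    rw [pvChop_eq_slices mu ps [p] (by simp)]
    rfl

lemma pvFoldA_chop (mu : String) (ps : List (List String)) :
    ∀ (acc : List (List (List String))) (cur : List (List String)), cur ≠ [] →
    (ps.foldl (fun (s : List (List (List String)) × List (List String)) part =>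
        if pvHead part == mu then
          ((if s.2.length ≠ 0 then s.1 ++ [s.2] else s.1), [part])
        else
          (s.1, s.2 ++ [part])) (acc, cur)).1
      ++ [(ps.foldl (fun (s : List (List (List String)) × List (List String)) part =>
        if pvHead part == mu then
          ((if s.2.length ≠ 0 then s.1 ++ [s.2] else s.1), [part])
        else
          (s.1, s.2 ++ [part])) (acc, cur)).2]
      = acc ++ pvChop mu cur ps := by
  induction ps with
  | nil => intro acc cur hcur; simp [pvChop]
  | cons q qs ih =>
    intro acc cur hcur
    rw [List.foldl_cons]
    by_cases hb : pvHead q == mu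
    · rw [if_pos hb, pvChop, if_pos hb]
      rw [if_pos (by simpa using hcur)]
      rw [ih (acc ++ [cur]) [q] (by simp)]
      simp
    · rw [if_neg hb, pvChop, if_neg hb]
      exact ih acc (cur ++ [q]) (by simp)

lemma pvFoldA_seg (mu : String) (path : List (List String)) (acc : List (List (List String))) :
    (path.foldl (fun (s : List (List (List String)) × List (List String)) part =>
        if pvHead part == mu then
          ((if s.2.length ≠ 0 then s.1 ++ [s.2] else s.1), [part])
        else
          (s.1, s.2 ++ [part])) (acc, [])).1
      ++ [(path.foldl (fun (s : List (List (List String)) × List (List String)) part =>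
        if pvHead part == mu then
          ((if s.2.length ≠ 0 then s.1 ++ [s.2] else s.1), [part])
        else
          (s.1, s.2 ++ [part])) (acc, [])).2]
      = acc ++ pvSegA mu path := by
  cases path with
  | nil => simp [pvSegA]
  | cons p ps =>
    rw [List.foldl_cons]
    by_cases hb : pvHead p == mu
    · rw [if_pos hb]
      rw [if_neg (by simp)]
      exact pvFoldA_chop mu ps acc [p] (by simp)
    · rw [if_neg hb]
      exact pvFoldA_chop mu ps acc [p] (by simp)

lemma pvMu_eq (heads : List String) :
    (match (PySem.Dict.counter heads).get? "Art" with
     | some n => if n ≠ 0 then "Art" else "§"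
     | none => "§")
      = (if heads.any (fun h => h == "Art") then "Art" else "§") := by
  have hany : heads.any (fun h => h == "Art") = heads.contains "Art" := by
    rw [List.any_beq']
  cases hget : (PySem.Dict.counter heads).get? "Art" with
  | none =>
    have : (PySem.Dict.counter heads).contains "Art" = false := by
      rw [PySem.Dict.contains_eq_isSome_get?, hget]; rfl
    rw [PySem.Dict.contains_counter] at this
    rw [hany, this]
    simp
  | some n =>
    have hcontains : (PySem.Dict.counter heads).contains "Art" = true := by
      rw [PySem.Dict.contains_eq_isSome_get?, hget]; rfl
    have hmem : heads.contains "Art" = true := by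
      rwa [PySem.Dict.contains_counter] at hcontains
    have hn : n = (heads.count "Art" : Int) := by
      have := PySem.Dict.getD_counter heads "Art"
      rw [PySem.Dict.getD_eq_get?_getD, hget] at this
      simpa using this
    have hpos : 0 < heads.count "Art" := by
      rw [List.contains_iff_mem] at hmem
      exact List.count_pos_iff.mpr hmem
    rw [hany, hmem]
    simp only [hn]
    rw [if_pos (by exact_mod_cast hpos.ne')]
    simp

lemma pvA_flatMap (reference_paths : List (List (List String))) (mu : String)
    (hmu : mu = (match (PySem.Dict.counter ((reference_paths.flatten).map pvHead)).get? "Art" with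
     | some n => if n ≠ 0 then "Art" else "§"
     | none => "§")) :
    split_parts_accidently_joined reference_paths = reference_paths.flatMap (pvSegA mu) := by
  unfold split_parts_accidently_joined
  rw [← hmu]
  dsimp only
  refine (PySem.List.foldl_congr_mem reference_paths _
      (fun acc path => acc ++ pvSegA mu path) [] ?_).trans ?_
  · intro acc path _
    exact pvFoldA_seg mu path acc
  · rw [PySem.List.foldl_append_eq_flatMap]
    rfl

lemma pvB_flatMap (reference_paths : List (List (List String))) (mu : String)
    (hmu : mu = (if reference_paths.flatten.any (fun part => pvHead part == "Art") then "Art" else "§")) :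
    split_parts_accidently_joined_alt reference_paths = reference_paths.flatMap (pvSegA mu) := by
  unfold split_parts_accidently_joined_alt
  rw [← hmu]
  dsimp only
  refine (PySem.List.foldl_congr_mem reference_paths _
      (fun acc path => acc ++ pvSegA mu path) [] ?_).trans ?_
  · intro acc path _
    rw [pvSegB_path mu path]
  · rw [PySem.List.foldl_append_eq_flatMap]
    rfl

-- ===== VERDICT (by name: the statement is the Claim_ definition above) =====
theorem split_parts_accidently_joined_spec : Claim_equal_split_parts_accidently_joined := by
  intro rps _ _
  unfold Spec_split_parts_accidently_joined
  rw [pvA_flatMap rps _ rfl, pvB_flatMap rps _ rfl, pvMu_eq]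
  congr 1
  rw [List.any_map]
  rfl
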